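-- pv_equiv track=rewrite | github.com/wsizowec/LAB_J-zyki-i-paradygmaty | lab1_zad3.py | optymalizacja_zadan_proceduralnie
-- ===== SOURCE A (Python) =====
-- def optymalizacja_zadan_proceduralnie(zadania):
--     zadania.sort(key=lambda x: x[1])
--     czas = 0
--     suma_oczekiwania = 0
--     kolejnosc = []
--     for czas_trwania, nagroda in zadania:
--         czas += czas_trwania
--         suma_oczekiwania += czas
--         kolejnosc.append((czas_trwania, nagroda))
--     return kolejnosc, suma_oczekiwania
-- ===== SOURCE B (Python) =====
-- def optymalizacja_zadan_proceduralnie(zadania):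
--     zadania.sort(key=lambda x: x[1])
--     kolejnosc = [(d, n) for d, n in zadania]
--     suma_oczekiwania = sum((len(zadania) - i) * d for i, (d, n) in enumerate(zadania))
--     return kolejnosc, suma_oczekiwania
-- ===== Notes on version B (the rewrite author's own statement) =====
-- stated objective: simpler
-- what changed: Replaces the running-total loop (czas/suma accumulators with append) by a comprehension for the order plus a closed weighted sum: each duration is counted once with weight (n - i) instead of being re-added through a prefix-sum accumulator.
import Mathlib
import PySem

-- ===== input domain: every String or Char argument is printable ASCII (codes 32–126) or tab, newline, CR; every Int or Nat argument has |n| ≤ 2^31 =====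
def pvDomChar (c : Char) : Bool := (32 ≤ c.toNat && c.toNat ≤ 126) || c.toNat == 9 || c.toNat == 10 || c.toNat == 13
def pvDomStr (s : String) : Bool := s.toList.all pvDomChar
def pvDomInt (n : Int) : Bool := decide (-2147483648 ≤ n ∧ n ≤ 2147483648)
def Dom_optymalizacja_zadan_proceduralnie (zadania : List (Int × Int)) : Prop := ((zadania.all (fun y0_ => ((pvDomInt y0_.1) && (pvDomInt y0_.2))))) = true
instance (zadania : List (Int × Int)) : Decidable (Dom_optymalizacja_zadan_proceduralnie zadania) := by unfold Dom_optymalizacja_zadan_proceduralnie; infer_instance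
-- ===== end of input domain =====

-- B sorts the same way but builds the order by a comprehension and computes the total
-- waiting time as a closed weighted sum instead of a running prefix-sum accumulator (objective: simpler).
-- A sorts its argument in place; B performs the same in-place sort (the equivalence proved is about the return value).


-- ===== PORT A =====
-- zadania.sort(key=lambda x: x[1]); then a loop keeping czas, suma_oczekiwania and kolejnosc.
def optymalizacja_zadan_proceduralnie (zadania : List (Int × Int)) : (List (Int × Int)) × Int :=
  let zadania := PySem.List.sorted zadania (fun x => x.2) false
  let r := zadania.foldl
    (fun st p =>
      let czas := st.1 + p.1
      (czas, st.2.1 + czas, st.2.2 ++ [(p.1, p.2)]))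
    ((0 : Int), (0 : Int), ([] : List (Int × Int)))
  (r.2.2, r.2.1)

-- ===== PORT B =====
-- same in-place sort; comprehension for kolejnosc; closed weighted sum for suma_oczekiwania.
def optymalizacja_zadan_proceduralnie_alt (zadania : List (Int × Int)) : (List (Int × Int)) × Int :=
  let zadania := PySem.List.sorted zadania (fun x => x.2) false
  let kolejnosc := zadania.map (fun p => (p.1, p.2))
  let suma_oczekiwania :=
    ((PySem.List.enumerate zadania).map
      (fun ip => ((zadania.length : Int) - ip.1) * ip.2.1)).sum
  (kolejnosc, suma_oczekiwania)

-- ===== PRECONDITION & SPEC =====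
def Spec_optymalizacja_zadan_proceduralnie (zadania : List (Int × Int)) (out : (List (Int × Int)) × Int) : Prop := out = optymalizacja_zadan_proceduralnie_alt zadania
instance (zadania : List (Int × Int)) (out : (List (Int × Int)) × Int) : Decidable (Spec_optymalizacja_zadan_proceduralnie zadania out) := by unfold Spec_optymalizacja_zadan_proceduralnie; infer_instance

-- ===== CLAIM (what is proved, stated in full; the proofs are below) =====
def Claim_equal_optymalizacja_zadan_proceduralnie : Prop := ∀ (zadania : List (Int × Int)), Dom_optymalizacja_zadan_proceduralnie zadania → Spec_optymalizacja_zadan_proceduralnie zadania (optymalizacja_zadan_proceduralnie zadania)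

-- ===== LEMMAS AND PROOFS =====

-- Weighted sum in recursive form: V l c = c*d₀ + (c-1)*d₁ + …
def pvV : List (Int × Int) → Int → Int
  | [], _ => 0
  | x :: t, c => c * x.1 + pvV t (c - 1)

theorem pvV_enum (l : List (Int × Int)) (c s : Int) :
    ((PySem.List.enumerate l s).map (fun ip => ((c + s) - ip.1) * ip.2.1)).sum = pvV l c := by
  induction l generalizing c s with
  | nil => simp [PySem.List.enumerate_nil, pvV]
  | cons x t ih =>
      have h := ih (c - 1) (s + 1)
      simp only [PySem.List.enumerate_cons, List.map_cons, List.sum_cons, pvV]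
      have : (c - 1) + (s + 1) = c + s := by ring
      rw [this] at h
      rw [h]
      ring_nf

theorem pv_loop (l : List (Int × Int)) (czas suma : Int) (kol : List (Int × Int)) :
    l.foldl
      (fun st p =>
        let czas := st.1 + p.1
        (czas, st.2.1 + czas, st.2.2 ++ [(p.1, p.2)]))
      (czas, suma, kol)
    = (czas + (l.map (·.1)).sum,
       suma + (l.length : Int) * czas + pvV l (l.length : Int),
       kol ++ l.map (fun p => (p.1, p.2))) := by
  induction l generalizing czas suma kol with
  | nil => simp [pvV]
  | cons x t ih =>
      simp only [List.foldl_cons, List.map_cons, List.sum_cons, List.length_cons, pvV]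
      rw [ih]
      refine Prod.ext ?_ (Prod.ext ?_ ?_)
      · simp; ring
      · simp only
        push_cast
        have : ((t.length : Int) + 1 - 1) = (t.length : Int) := by ring
        rw [this]
        ring
      · simp

theorem optymalizacja_zadan_proceduralnie_spec :
    Claim_equal_optymalizacja_zadan_proceduralnie := by
  intro zadania _
  unfold Spec_optymalizacja_zadan_proceduralnie
  unfold optymalizacja_zadan_proceduralnie optymalizacja_zadan_proceduralnie_alt
  simp only []
  set s := PySem.List.sorted zadania (fun x => x.2) false with hs
  rw [pv_loop]
  have henum := pvV_enum s (s.length : Int) 0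
  simp only [add_zero] at henum
  simp [henum.symm]
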